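-- pv_equiv track=rewrite | github.com/nonrice/compprog | usaco/practice/2020/2020_us_open_bronze_1.py | largest_pockets_index
-- ===== SOURCE A (Python) =====
-- def largest_pockets_index(stalls):
--     largest_A = -1
--     largest_A_index = -1
--     largest_B = -1
--     largest_B_index = -1
--     cur_pocket = 0
--     cur_pocket_index = 0
--     stalls.append(1)
--     for i in range(0, len(stalls)):
--         if stalls[i] == 1:
--             if cur_pocket >= largest_A:
--                 largest_B = largest_A
--                 largest_B_index = largest_A_index
--                 largest_A = cur_pocket
--                 largest_A_index = cur_pocket_index
--             elif cur_pocket > largest_B: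
--                 largest_B = cur_pocket
--                 largest_B_index = cur_pocket_index
--             cur_pocket = 0
--             cur_pocket_index = i+1
--         else:
--             cur_pocket += 1
--     stalls.pop()
--     return largest_A, largest_A_index, largest_B, largest_B_index
-- ===== SOURCE B (Python) =====
-- def largest_pockets_index(stalls):
--     # One pass to collect pockets (length, start) including the trailing one,
--     # then one pass of top-two selection over the pocket list.
--     pockets = []
--     start = 0
--     for i, v in enumerate(stalls):
--         if v == 1:
--             pockets.append((i - start, start))
--             start = i + 1
--     pockets.append((len(stalls) - start, start))
--     la, lai, lb, lbi = -1, -1, -1, -1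
--     for sz, idx in pockets:
--         if sz >= la:
--             la, lai, lb, lbi = sz, idx, la, lai
--         elif sz > lb:
--             lb, lbi = sz, idx
--     return la, lai, lb, lbi
-- ===== Notes on version B (the rewrite author's own statement) =====
-- stated objective: alternative
-- what changed: B first materialises the list of pockets (length, start) in one pass over enumerate(stalls) plus a trailing sentinel pocket, then runs the top-two selection as a separate pass over that pocket list, instead of A's single index loop over the sentinel-extended stalls that interleaves run counting with selection.
import Mathlib
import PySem

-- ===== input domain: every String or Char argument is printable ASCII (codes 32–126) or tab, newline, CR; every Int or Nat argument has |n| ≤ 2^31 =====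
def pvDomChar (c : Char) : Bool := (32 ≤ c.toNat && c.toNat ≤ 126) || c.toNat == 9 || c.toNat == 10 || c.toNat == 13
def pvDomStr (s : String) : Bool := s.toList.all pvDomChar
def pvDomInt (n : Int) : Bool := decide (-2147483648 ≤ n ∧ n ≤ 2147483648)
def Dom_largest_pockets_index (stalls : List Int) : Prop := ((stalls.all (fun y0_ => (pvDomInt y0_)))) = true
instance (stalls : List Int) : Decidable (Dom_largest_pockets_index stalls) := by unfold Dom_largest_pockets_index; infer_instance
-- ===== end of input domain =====

-- B builds the pocket list in one pass and then does the top-two selection over it; same return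
-- value as A. (A's sentinel append/pop on its argument is a net no-op; the claim is about the return value.)

-- ===== PORT A =====
-- literal transliteration: append the sentinel stall; for i in range(0, len(stalls)): …; pop it
def largest_pockets_index (stalls : List Int) : Int × Int × Int × Int :=
  let s := stalls ++ [1]
  let r := (PySem.List.pyRange 0 (s.length : Int) 1).foldl
    (fun (acc : (Int × Int × Int × Int) × Int × Int) i =>
      if PySem.List.pyGetD s i 0 = 1 then
        if acc.2.1 ≥ acc.1.1 then ((acc.2.1, acc.2.2, acc.1.1, acc.1.2.1), 0, i + 1)
        else if acc.2.1 > acc.1.2.2.1 then ((acc.1.1, acc.1.2.1, acc.2.1, acc.2.2), 0, i + 1)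
        else (acc.1, 0, i + 1)
      else (acc.1, acc.2.1 + 1, acc.2.2))
    ((-1, -1, -1, -1), 0, 0)
  r.1

-- ===== PORT B =====
-- pocket-collection loop body of Source B (acc = (pockets, start))
def lpiPStep (acc : List (Int × Int) × Int) (p : Int × Int) : List (Int × Int) × Int :=
  if p.2 = 1 then (acc.1 ++ [(p.1 - acc.2, acc.2)], p.1 + 1) else acc

-- selection loop body of Source B (acc = (la, lai, lb, lbi), p = (size, index))
def lpiSelStep (acc : Int × Int × Int × Int) (p : Int × Int) : Int × Int × Int × Int :=
  if p.1 ≥ acc.1 then (p.1, p.2, acc.1, acc.2.1)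
  else if p.1 > acc.2.2.1 then (acc.1, acc.2.1, p.1, p.2)
  else acc

def largest_pockets_index_alt (stalls : List Int) : Int × Int × Int × Int :=
  let r := (PySem.List.enumerate stalls 0).foldl lpiPStep ([], 0)
  let pockets := r.1 ++ [((stalls.length : Int) - r.2, r.2)]
  pockets.foldl lpiSelStep (-1, -1, -1, -1)

-- ===== PRECONDITION & SPEC =====
def Spec_largest_pockets_index (stalls : List Int) (out : Int × Int × Int × Int) : Prop := out = largest_pockets_index_alt stalls
instance (stalls : List Int) (out : Int × Int × Int × Int) : Decidable (Spec_largest_pockets_index stalls out) := by unfold Spec_largest_pockets_index; infer_instance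

-- ===== CLAIM (what is proved, stated in full; the proofs are below) =====
def Claim_equal_largest_pockets_index : Prop := ∀ (stalls : List Int), Dom_largest_pockets_index stalls → Spec_largest_pockets_index stalls (largest_pockets_index stalls)

-- ===== LEMMAS AND PROOFS =====

-- A's loop body rephrased over (index, value) pairs
def lpiAStep (acc : (Int × Int × Int × Int) × Int × Int) (p : Int × Int) : (Int × Int × Int × Int) × Int × Int :=
  if p.2 = 1 then (lpiSelStep acc.1 (acc.2.1, acc.2.2), 0, p.1 + 1)
  else (acc.1, acc.2.1 + 1, acc.2.2)

-- the pocket list of xs, with index offset i0 and current pocket starting at start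
def lpiPockets (xs : List Int) (i0 start : Int) : List (Int × Int) :=
  let r := (PySem.List.enumerate xs i0).foldl lpiPStep ([], start)
  r.1 ++ [(i0 + (xs.length : Int) - r.2, r.2)]

-- the accumulated pocket list is a prefix: folding from (l, st) just prepends l
theorem lpiPStep_prefix (ps : List (Int × Int)) :
    ∀ (l : List (Int × Int)) (st : Int),
      ps.foldl lpiPStep (l, st)
        = (l ++ (ps.foldl lpiPStep ([], st)).1, (ps.foldl lpiPStep ([], st)).2) := by
  induction ps with
  | nil => intro l st; simp
  | cons p ps ih =>
      intro l st
      by_cases h : p.2 = 1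
      · simp only [List.foldl_cons, lpiPStep, h, if_true, List.nil_append]
        rw [ih (l ++ [(p.1 - st, st)]) (p.1 + 1), ih [(p.1 - st, st)] (p.1 + 1)]
        simp
      · simp only [List.foldl_cons, lpiPStep, h, if_false]
        exact ih l st

-- members of enumerate xs k index into xs
theorem lpi_enum_get (xs : List Int) : ∀ (k : Nat) (p : Int × Int),
    p ∈ PySem.List.enumerate xs (k : Int) → PySem.List.pyGetD xs (p.1 - k) 0 = p.2 := by
  induction xs with
  | nil => intro k p hp; simp [PySem.List.enumerate] at hp
  | cons x xs ih =>
      intro k p hp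
      rw [PySem.List.enumerate_cons] at hp
      rcases List.mem_cons.mp hp with h | h
      · subst h
        simp only [sub_self]
        have : (0 : Int) = ((0 : Nat) : Int) := by norm_num
        rw [this, PySem.List.pyGetD_natCast]
        rfl
      · have hcast : ((k : Int) + 1) = ((k + 1 : Nat) : Int) := by push_cast; ring
        rw [hcast] at h
        have hb : ((k + 1 : Nat) : Int) ≤ p.1 := by
          have hm : p.1 ∈ (PySem.List.enumerate xs ((k + 1 : Nat) : Int)).map (fun q => q.1) :=
            List.mem_map_of_mem h
          rw [PySem.List.map_fst_enumerate] at hm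
          exact (PySem.List.mem_pyRange_one.mp hm).1
        have ihp := ih (k + 1) p h
        obtain ⟨m, hm⟩ : ∃ m : Nat, p.1 - ((k + 1 : Nat) : Int) = (m : Int) :=
          ⟨(p.1 - ((k + 1 : Nat) : Int)).toNat, by push_cast at hb ⊢; omega⟩
        have h1 : p.1 - (k : Int) = ((m + 1 : Nat) : Int) := by push_cast at hm ⊢; omega
        rw [hm, PySem.List.pyGetD_natCast] at ihp
        rw [h1, PySem.List.pyGetD_natCast]
        exact ihp

-- A's index loop over xs ++ [1] computes the selection fold over the pocket list of xs
theorem lpi_main (xs : List Int) : ∀ (i0 start : Int) (sel : Int × Int × Int × Int),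
    ((PySem.List.enumerate (xs ++ [1]) i0).foldl lpiAStep (sel, i0 - start, start)).1
      = (lpiPockets xs i0 start).foldl lpiSelStep sel := by
  induction xs with
  | nil =>
      intro i0 start sel
      simp [PySem.List.enumerate_cons, PySem.List.enumerate, lpiAStep, lpiPockets]
  | cons x xs ih =>
      intro i0 start sel
      simp only [List.cons_append, PySem.List.enumerate_cons, List.foldl_cons]
      by_cases h : x = 1
      · have hstep : lpiAStep (sel, i0 - start, start) (i0, x)
            = (lpiSelStep sel (i0 - start, start), (i0 + 1) - (i0 + 1), i0 + 1) := by
          simp [lpiAStep, h]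
        rw [hstep, ih (i0 + 1) (i0 + 1) (lpiSelStep sel (i0 - start, start))]
        -- now compute the pocket list of x :: xs
        simp only [lpiPockets, PySem.List.enumerate_cons, List.foldl_cons]
        have hp : lpiPStep ([], start) (i0, x) = ([(i0 - start, start)], i0 + 1) := by
          simp [lpiPStep, h]
        rw [hp, lpiPStep_prefix (PySem.List.enumerate xs (i0 + 1)) [(i0 - start, start)] (i0 + 1)]
        have hlen : i0 + ((x :: xs).length : Int) = (i0 + 1) + (xs.length : Int) := by
          push_cast [List.length_cons]; ring
        simp only [hlen, List.nil_append, List.cons_append, List.foldl_cons]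
      · have hstep : lpiAStep (sel, i0 - start, start) (i0, x)
            = (sel, (i0 + 1) - start, start) := by
          simp [lpiAStep, h]; ring
        rw [hstep, ih (i0 + 1) start sel]
        simp only [lpiPockets, PySem.List.enumerate_cons, List.foldl_cons]
        have hp : lpiPStep ([], start) (i0, x) = ([], start) := by simp [lpiPStep, h]
        rw [hp]
        have hlen : i0 + ((x :: xs).length : Int) = (i0 + 1) + (xs.length : Int) := by
          push_cast [List.length_cons]; ring
        simp only [hlen]

-- A's literal body agrees with lpiAStep on every (index, value) pair of the scanned list
theorem lpi_body_eq (s : List Int) (acc : (Int × Int × Int × Int) × Int × Int)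
    (p : Int × Int) (hp : p ∈ PySem.List.enumerate s 0) :
    (fun (acc : (Int × Int × Int × Int) × Int × Int) (i : Int) =>
      if PySem.List.pyGetD s i 0 = 1 then
        if acc.2.1 ≥ acc.1.1 then ((acc.2.1, acc.2.2, acc.1.1, acc.1.2.1), 0, i + 1)
        else if acc.2.1 > acc.1.2.2.1 then ((acc.1.1, acc.1.2.1, acc.2.1, acc.2.2), 0, i + 1)
        else (acc.1, 0, i + 1)
      else (acc.1, acc.2.1 + 1, acc.2.2)) acc p.1 = lpiAStep acc p := by
  have hv : PySem.List.pyGetD s p.1 0 = p.2 := by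
    have h := lpi_enum_get s 0 p (by simpa using hp)
    simpa using h
  simp only [hv, lpiAStep, lpiSelStep]
  split_ifs <;> rfl

-- ===== VERDICT (by name: the statement is the Claim_ definition above) =====
theorem largest_pockets_index_spec : Claim_equal_largest_pockets_index := by
  intro stalls _
  unfold Spec_largest_pockets_index largest_pockets_index largest_pockets_index_alt
  dsimp only
  have hrange : PySem.List.pyRange 0 (((stalls ++ [1]).length : Int)) 1
      = (PySem.List.enumerate (stalls ++ [1]) 0).map (fun q => q.1) := by
    rw [PySem.List.map_fst_enumerate]; norm_num
  rw [hrange, List.foldl_map,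
      PySem.List.foldl_congr_mem _ _ _ _
        (fun acc p hp => lpi_body_eq (stalls ++ [1]) acc p hp)]
  have h00 : (((-1, -1, -1, -1), (0 : Int), (0 : Int)) : (Int × Int × Int × Int) × Int × Int)
      = ((-1, -1, -1, -1), (0 : Int) - 0, (0 : Int)) := by norm_num
  rw [h00, lpi_main stalls 0 0 (-1, -1, -1, -1)]
  simp [lpiPockets]
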